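-- pv_equiv track=rewrite | github.com/llirik42/Tournament | graph_utils.py | graph_b
-- ===== SOURCE A (Python) =====
-- def proverka_b(a, b):  # пункт б
--     a = str(a)
--     b = str(b)
--     if len(a) < len(b):
--         a, b = b, a
--     if (len(a) - len(b)) != 1:
--         return False
--     for i in range(len(a)):
--         candidate = ""
--         for j in range(len(a)):
--             if j != i:
--                 candidate += a[j]
--         if candidate == b:
--             return True
--     return False
--
-- def graph_b(prime_numbers):
--     neighbors = {}
--     for i in range(len(prime_numbers)):
--         for j in range(i + 1, len(prime_numbers)):
--             n1 = prime_numbers[i]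
--             n2 = prime_numbers[j]
--             if proverka_b(n1, n2):
--                 if n1 not in neighbors:
--                     neighbors[n1] = []
--                 if n2 not in neighbors:
--                     neighbors[n2] = []
--                 neighbors[n1].append(n2)
--                 neighbors[n2].append(n1)
--
--     return neighbors
-- ===== SOURCE B (Python) =====
-- def graph_b(prime_numbers):
--     n = len(prime_numbers)
--     strs = [str(v) for v in prime_numbers]
--     dels = [[s[:k] + s[k + 1:] for k in range(len(s))] for s in strs]
--     pos = {}    # exact string -> ascending indices holding it
--     for idx, s in enumerate(strs):
--         pos.setdefault(s, []).append(idx)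
--     dmap = {}   # deletion-candidate string -> ascending indices producing it
--     for idx, cs in enumerate(dels):
--         for c in cs:
--             dmap.setdefault(c, []).append(idx)
--     neighbors = {}
--     for i in range(n):
--         partners = set()
--         for c in dels[i]:
--             for j in pos.get(c, []):
--                 partners.add(j)
--         for j in dmap.get(strs[i], []):
--             partners.add(j)
--         for j in sorted(partners):
--             if j > i:
--                 add_edge(neighbors, prime_numbers[i], prime_numbers[j])
--     return neighbors
--
-- def add_edge(neighbors, n1, n2):
--     if n1 not in neighbors:
--         neighbors[n1] = []
--     if n2 not in neighbors:
--         neighbors[n2] = []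
--     neighbors[n1].append(n2)
--     neighbors[n2].append(n1)
-- ===== Notes on version B (the rewrite author's own statement) =====
-- stated objective: faster
-- what changed: Instead of testing all O(n^2) pairs with an O(L^2) character-by-character deletion check, B precomputes each number's decimal string and its L deletion-candidates once, builds two hash indexes (string -> indices, deletion-candidate -> indices), and finds each number's neighbours by hash lookups, replaying the edges in A's exact (i,j) order.
import Mathlib
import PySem

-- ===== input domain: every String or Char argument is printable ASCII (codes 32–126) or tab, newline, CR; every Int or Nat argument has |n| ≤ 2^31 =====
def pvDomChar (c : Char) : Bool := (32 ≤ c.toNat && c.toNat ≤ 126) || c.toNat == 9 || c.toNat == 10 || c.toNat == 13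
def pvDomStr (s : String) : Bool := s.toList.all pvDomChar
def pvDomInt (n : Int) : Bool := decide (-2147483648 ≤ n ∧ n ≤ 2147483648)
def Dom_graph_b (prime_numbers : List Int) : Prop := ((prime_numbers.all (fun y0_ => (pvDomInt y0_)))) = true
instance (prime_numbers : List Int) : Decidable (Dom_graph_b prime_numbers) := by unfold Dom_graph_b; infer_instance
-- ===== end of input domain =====

-- B replaces A's O(n^2 * L^2) all-pairs deletion test by hash indexes of the decimal strings and
-- their one-character deletions, replaying the found edges in A's exact (i, j) order.

-- ===== PORT A =====
-- Python strings are handled as List Char (PySem.Chars layer); str(v) is PySem.Int.toChars.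
def proverka_b (a0 b0 : Int) : Bool :=
  let a := PySem.Int.toChars a0
  let b := PySem.Int.toChars b0
  let p := if PySem.List.len a < PySem.List.len b then (b, a) else (a, b)
  let a := p.1
  let b := p.2
  if (PySem.List.len a - PySem.List.len b) ≠ 1 then false
  else
    -- 'for i in …: if candidate == b: return True' / 'return False' = any
    (PySem.List.pyRange 0 (PySem.List.len a) 1).any (fun i =>
      let candidate := (PySem.List.pyRange 0 (PySem.List.len a) 1).foldl
        (fun cand j => if j ≠ i then cand ++ [PySem.List.pyGetD a j ' '] else cand) ([] : List Char)
      candidate == b)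

-- the four dict statements shared by both Pythons (A inline, B's helper add_edge)
def pvEdge (nb : PySem.Dict Int (List Int)) (n1 n2 : Int) : PySem.Dict Int (List Int) :=
  let nb := if nb.contains n1 then nb else nb.insert n1 ([] : List Int)
  let nb := if nb.contains n2 then nb else nb.insert n2 ([] : List Int)
  let nb := nb.modify n1 [] (· ++ [n2])
  nb.modify n2 [] (· ++ [n1])

def graph_b (prime_numbers : List Int) : List (Int × List Int) :=
  let nb := (PySem.List.pyRange 0 (PySem.List.len prime_numbers) 1).foldl (fun nb i =>
    (PySem.List.pyRange (i + 1) (PySem.List.len prime_numbers) 1).foldl (fun nb j =>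
      let n1 := PySem.List.pyGetD prime_numbers i 0
      let n2 := PySem.List.pyGetD prime_numbers j 0
      if proverka_b n1 n2 then pvEdge nb n1 n2 else nb) nb)
    (PySem.Dict.empty : PySem.Dict Int (List Int))
  nb.items

-- ===== PORT B =====
-- s[:k] + s[k+1:] for each k: the deletion candidates of one string
def pvDels (s : List Char) : List (List Char) :=
  (PySem.List.pyRange 0 (PySem.List.len s) 1).map (fun k =>
    PySem.List.slice s none (some k) ++ PySem.List.slice s (some (k + 1)) none)

def graph_b_alt (prime_numbers : List Int) : List (Int × List Int) :=
  let strs := prime_numbers.map (fun v => PySem.Int.toChars v)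
  let dels := strs.map pvDels
  -- pos.setdefault(s, []).append(idx)  =  modify s [] (· ++ [idx])
  let pos := (PySem.List.enumerate strs).foldl
    (fun d p => d.modify p.2 [] (· ++ [p.1]))
    (PySem.Dict.empty : PySem.Dict (List Char) (List Int))
  let dmap := (PySem.List.enumerate dels).foldl
    (fun d p => p.2.foldl (fun d c => d.modify c [] (· ++ [p.1])) d)
    (PySem.Dict.empty : PySem.Dict (List Char) (List Int))
  let nb := (PySem.List.pyRange 0 (PySem.List.len prime_numbers) 1).foldl (fun nb i =>
    let partners := (PySem.List.pyGetD dels i []).foldl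
      (fun s c => PySem.Set.update s (pos.getD c []))
      (PySem.Set.empty : PySem.Set Int)
    let partners := PySem.Set.update partners (dmap.getD (PySem.List.pyGetD strs i []) [])
    (PySem.List.sorted partners (fun x => x)).foldl (fun nb j =>
      if j > i then
        pvEdge nb (PySem.List.pyGetD prime_numbers i 0) (PySem.List.pyGetD prime_numbers j 0)
      else nb) nb)
    (PySem.Dict.empty : PySem.Dict Int (List Int))
  nb.items

-- ===== PRECONDITION & SPEC =====
def Spec_graph_b (prime_numbers : List Int) (out : List (Int × List Int)) : Prop := out = graph_b_alt prime_numbers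
instance (prime_numbers : List Int) (out : List (Int × List Int)) : Decidable (Spec_graph_b prime_numbers out) := by unfold Spec_graph_b; infer_instance

-- ===== CLAIM (what is proved, stated in full; the proofs are below) =====
def Claim_equal_graph_b : Prop := ∀ (prime_numbers : List Int), Dom_graph_b prime_numbers → Spec_graph_b prime_numbers (graph_b prime_numbers)

-- ===== LEMMAS AND PROOFS =====

-- delAt s k = s with character k removed (what both deletion computations produce)
def delAt (s : List Char) (k : Nat) : List Char := s.take k ++ s.drop (k + 1)

theorem length_delAt (s : List Char) (k : Nat) (hk : k < s.length) :
    (delAt s k).length + 1 = s.length := by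
  simp [delAt]; omega

theorem mem_pvDels (s : List Char) (c : List Char) :
    c ∈ pvDels s ↔ ∃ k : Nat, k < s.length ∧ c = delAt s k := by
  unfold pvDels delAt
  simp only [List.mem_map, PySem.List.mem_pyRange_one, PySem.List.len_eq]
  constructor
  · rintro ⟨k, ⟨hk0, hk1⟩, rfl⟩
    refine ⟨k.toNat, by omega, ?_⟩
    rw [PySem.List.slice_to s hk0, PySem.List.slice_from s (by omega)]
    have h2 : (k + 1).toNat = k.toNat + 1 := by omega
    rw [h2]
  · rintro ⟨k, hk, rfl⟩
    refine ⟨(k : Int), ⟨by omega, by omega⟩, ?_⟩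
    rw [PySem.List.slice_to s (by omega), PySem.List.slice_from s (by omega)]
    have h1 : ((k : Int)).toNat = k := by omega
    have h2 : ((k : Int) + 1).toNat = k + 1 := by omega
    rw [h1, h2]

theorem mem_pvDels_length {s c : List Char} (h : c ∈ pvDels s) : c.length + 1 = s.length := by
  obtain ⟨k, hk, rfl⟩ := (mem_pvDels s c).mp h
  exact length_delAt s k hk

theorem map_getD_range_eq_take (a : List Char) (m : Nat) (hm : m ≤ a.length) :
    (List.range m).map (fun k => a.getD k ' ') = a.take m := by
  apply List.ext_getElem
  · simp; omega
  · intro k h1 h2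
    simp only [List.getElem_map, List.getElem_range, List.getElem_take]
    rw [List.getD_eq_getElem a ' ' (by simp at h1; omega)]

-- A's inner candidate-building loop computes delAt
theorem candA (a : List Char) (i : Int) (h0 : 0 ≤ i) (hl : i < (a.length : Int)) :
    (PySem.List.pyRange 0 (PySem.List.len a) 1).foldl
      (fun cand j => if j ≠ i then cand ++ [PySem.List.pyGetD a j ' '] else cand) ([] : List Char)
      = delAt a i.toNat := by
  rw [PySem.List.foldl_append_ite (p := fun j => j ≠ i) (f := fun j => PySem.List.pyGetD a j ' ')]
  simp only [List.nil_append, PySem.List.len_eq]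
  rw [PySem.List.pyRange_one_append 0 i (a.length : Int) h0 (le_of_lt hl),
      PySem.List.pyRange_one_cons hl, List.filter_append, List.filter_cons]
  rw [if_neg (by simp)]
  have hf1 : List.filter (fun x => decide (x ≠ i)) (PySem.List.pyRange 0 i)
      = PySem.List.pyRange 0 i :=
    List.filter_eq_self.mpr (fun j hj => by
      rw [PySem.List.mem_pyRange_one] at hj
      simp only [ne_eq, decide_eq_true_eq]
      omega)
  have hf2 : List.filter (fun x => decide (x ≠ i)) (PySem.List.pyRange (i + 1) (a.length : Int))
      = PySem.List.pyRange (i + 1) (a.length : Int) :=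
    List.filter_eq_self.mpr (fun j hj => by
      rw [PySem.List.mem_pyRange_one] at hj
      simp only [ne_eq, decide_eq_true_eq]
      omega)
  rw [hf1, hf2, List.map_append]
  have hdrop : (PySem.List.pyRange (i + 1) (a.length : Int)).map (fun j => PySem.List.pyGetD a j ' ')
      = a.drop (i + 1).toNat := by
    have h := PySem.List.map_pyGetD_pyRange a ' ' (a := i + 1) (by omega)
    simp only [PySem.List.len_eq] at h
    exact h
  have htake : (PySem.List.pyRange 0 i).map (fun j => PySem.List.pyGetD a j ' ') = a.take i.toNat := by
    rw [PySem.List.pyRange_one 0 i, List.map_map]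
    have hc : ((fun j => PySem.List.pyGetD a j ' ') ∘ fun k : Nat => (0 : Int) + (k : Int))
        = fun k : Nat => a.getD k ' ' := by
      funext k
      simp only [Function.comp, zero_add, PySem.List.pyGetD_natCast]
    rw [hc]
    have h0i : (i - 0).toNat = i.toNat := by omega
    rw [h0i, map_getD_range_eq_take a i.toNat (by omega)]
  rw [hdrop, htake, delAt]
  have h1 : (i + 1).toNat = i.toNat + 1 := by omega
  rw [h1]

-- the post-swap body of proverka_b, characterised as deletion membership (a is the not-shorter string)
theorem provAux (a b : List Char) (hge : b.length ≤ a.length) :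
    ((if (PySem.List.len a - PySem.List.len b) ≠ 1 then false
      else (PySem.List.pyRange 0 (PySem.List.len a) 1).any (fun i =>
        ((PySem.List.pyRange 0 (PySem.List.len a) 1).foldl
          (fun cand j => if j ≠ i then cand ++ [PySem.List.pyGetD a j ' '] else cand) ([] : List Char))
          == b)) = true)
    ↔ b ∈ pvDels a := by
  split_ifs with hd
  · simp only [false_iff]
    intro hmem
    have := mem_pvDels_length hmem
    simp only [PySem.List.len_eq] at hd
    omega
  · rw [List.any_eq_true]
    constructor
    · rintro ⟨i, hi, hc⟩
      rw [PySem.List.mem_pyRange_one] at hi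
      simp only [PySem.List.len_eq] at hi
      rw [candA a i hi.1 hi.2] at hc
      rw [mem_pvDels]
      exact ⟨i.toNat, by omega, (beq_iff_eq.mp hc).symm⟩
    · intro hmem
      obtain ⟨k, hk, rfl⟩ := (mem_pvDels a b).mp hmem
      refine ⟨(k : Int), ?_, ?_⟩
      · rw [PySem.List.mem_pyRange_one]
        simp only [PySem.List.len_eq]
        omega
      · rw [candA a (k : Int) (by omega) (by simp; omega)]
        simp

-- adjacency characterisation: proverka_b tests deletion membership in either direction
theorem proverka_iff (v1 v2 : Int) :
    proverka_b v1 v2 = true ↔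
      (PySem.Int.toChars v2 ∈ pvDels (PySem.Int.toChars v1) ∨
       PySem.Int.toChars v1 ∈ pvDels (PySem.Int.toChars v2)) := by
  unfold proverka_b
  dsimp only
  by_cases h : PySem.List.len (PySem.Int.toChars v1) < PySem.List.len (PySem.Int.toChars v2)
  · rw [if_pos h]
    dsimp only
    rw [provAux (PySem.Int.toChars v2) (PySem.Int.toChars v1)
        (by simp only [PySem.List.len_eq] at h; omega)]
    simp only [PySem.List.len_eq] at h
    constructor
    · exact fun hm => Or.inr hm
    · rintro (hm | hm)
      · have := mem_pvDels_length hm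
        omega
      · exact hm
  · rw [if_neg h]
    dsimp only
    rw [provAux (PySem.Int.toChars v1) (PySem.Int.toChars v2)
        (by simp only [PySem.List.len_eq] at h; omega)]
    simp only [PySem.List.len_eq] at h
    constructor
    · exact fun hm => Or.inl hm
    · rintro (hm | hm)
      · exact hm
      · have := mem_pvDels_length hm
        omega

-- membership in the value lists of B's grouping dicts (the two setdefault/append loops)
theorem fold_modify_mem (l : List (Int × List Char)) (d : PySem.Dict (List Char) (List Int))
    (c : List Char) (j : Int) :
    j ∈ (l.foldl (fun d p => d.modify p.2 [] (· ++ [p.1])) d).getD c []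
      ↔ j ∈ d.getD c [] ∨ ∃ p ∈ l, p.2 = c ∧ p.1 = j := by
  induction l generalizing d with
  | nil => simp
  | cons p t ih =>
    rw [List.foldl_cons, ih]
    have hG : ∀ j' : Int, j' ∈ (d.modify p.2 [] (· ++ [p.1])).getD c []
        ↔ j' ∈ d.getD c [] ∨ (c = p.2 ∧ j' = p.1) := by
      intro j'
      rw [PySem.Dict.getD_modify]
      by_cases hc : c = p.2
      · rw [if_pos hc]
        subst hc
        simp [List.mem_append]
      · rw [if_neg hc]
        simp [hc]
    rw [hG]
    simp only [List.mem_cons]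
    constructor
    · rintro ((h | ⟨hc2, hj⟩) | ⟨q, hq, h2, h1⟩)
      · exact Or.inl h
      · exact Or.inr ⟨p, Or.inl rfl, hc2.symm, hj.symm⟩
      · exact Or.inr ⟨q, Or.inr hq, h2, h1⟩
    · rintro (h | ⟨q, (rfl | hq), h2, h1⟩)
      · exact Or.inl (Or.inl h)
      · exact Or.inl (Or.inr ⟨h2.symm, h1.symm⟩)
      · exact Or.inr ⟨q, hq, h2, h1⟩

theorem fold_modify_mem_inner (cs : List (List Char)) (idx : Int)
    (d : PySem.Dict (List Char) (List Int)) (c : List Char) (j : Int) :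
    j ∈ (cs.foldl (fun d cc => d.modify cc [] (· ++ [idx])) d).getD c []
      ↔ j ∈ d.getD c [] ∨ (c ∈ cs ∧ j = idx) := by
  induction cs generalizing d with
  | nil => simp
  | cons cc t ih =>
    rw [List.foldl_cons, ih]
    have hG : ∀ j' : Int, j' ∈ (d.modify cc [] (· ++ [idx])).getD c []
        ↔ j' ∈ d.getD c [] ∨ (c = cc ∧ j' = idx) := by
      intro j'
      rw [PySem.Dict.getD_modify]
      by_cases hc : c = cc
      · rw [if_pos hc]
        subst hc
        simp [List.mem_append]
      · rw [if_neg hc]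
        simp [hc]
    rw [hG]
    simp only [List.mem_cons]
    tauto

theorem fold_modify_mem_nested (l : List (Int × List (List Char)))
    (d : PySem.Dict (List Char) (List Int)) (c : List Char) (j : Int) :
    j ∈ (l.foldl (fun d p => p.2.foldl (fun d cc => d.modify cc [] (· ++ [p.1])) d) d).getD c []
      ↔ j ∈ d.getD c [] ∨ ∃ p ∈ l, c ∈ p.2 ∧ j = p.1 := by
  induction l generalizing d with
  | nil => simp
  | cons p t ih =>
    rw [List.foldl_cons, ih, fold_modify_mem_inner]
    simp only [List.mem_cons]
    constructor
    · rintro ((h | ⟨h2, h1⟩) | ⟨q, hq, h2, h1⟩)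
      · exact Or.inl h
      · exact Or.inr ⟨p, Or.inl rfl, h2, h1⟩
      · exact Or.inr ⟨q, Or.inr hq, h2, h1⟩
    · rintro (h | ⟨q, (rfl | hq), h2, h1⟩)
      · exact Or.inl (Or.inl h)
      · exact Or.inl (Or.inr ⟨h2, h1⟩)
      · exact Or.inr ⟨q, hq, h2, h1⟩

theorem pos_mem (strs : List (List Char)) (c : List Char) (j : Int) :
    j ∈ ((PySem.List.enumerate strs).foldl (fun d p => d.modify p.2 [] (· ++ [p.1]))
          (PySem.Dict.empty : PySem.Dict (List Char) (List Int))).getD c []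
      ↔ ∃ k : Nat, ∃ _h : k < strs.length, strs[k] = c ∧ j = (k : Int) := by
  rw [fold_modify_mem]
  simp only [PySem.Dict.getD_empty, List.not_mem_nil, false_or]
  constructor
  · rintro ⟨p, hp, h2, h1⟩
    obtain ⟨k, hk, rfl⟩ := (PySem.List.mem_enumerate_iff strs 0 p).mp hp
    dsimp only at h1 h2
    exact ⟨k, hk, h2, by omega⟩
  · rintro ⟨k, hk, h2, rfl⟩
    refine ⟨((k : Int), strs[k]), (PySem.List.mem_enumerate_iff strs 0 _).mpr ⟨k, hk, by simp⟩, h2, rfl⟩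

theorem dmap_mem (dels : List (List (List Char))) (c : List Char) (j : Int) :
    j ∈ ((PySem.List.enumerate dels).foldl
          (fun d p => p.2.foldl (fun d cc => d.modify cc [] (· ++ [p.1])) d)
          (PySem.Dict.empty : PySem.Dict (List Char) (List Int))).getD c []
      ↔ ∃ k : Nat, ∃ _h : k < dels.length, c ∈ dels[k] ∧ j = (k : Int) := by
  rw [fold_modify_mem_nested]
  simp only [PySem.Dict.getD_empty, List.not_mem_nil, false_or]
  constructor
  · rintro ⟨p, hp, h2, h1⟩
    obtain ⟨k, hk, rfl⟩ := (PySem.List.mem_enumerate_iff dels 0 p).mp hp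
    dsimp only at h1 h2
    exact ⟨k, hk, h2, by omega⟩
  · rintro ⟨k, hk, h2, rfl⟩
    refine ⟨((k : Int), dels[k]), (PySem.List.mem_enumerate_iff dels 0 _).mpr ⟨k, hk, by simp⟩, h2, rfl⟩

-- membership / nodup of B's partner set
theorem partners_mem (cs : List (List Char)) (getp : List Char → List Int) (s0 : PySem.Set Int) (j : Int) :
    j ∈ cs.foldl (fun s c => PySem.Set.update s (getp c)) s0 ↔ j ∈ s0 ∨ ∃ c ∈ cs, j ∈ getp c := by
  induction cs generalizing s0 with
  | nil => simp
  | cons c t ih =>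
    rw [List.foldl_cons, ih, PySem.Set.mem_update]
    simp only [List.mem_cons]
    constructor
    · rintro ((h | h) | ⟨cc, hcc, hm⟩)
      · exact Or.inl h
      · exact Or.inr ⟨c, Or.inl rfl, h⟩
      · exact Or.inr ⟨cc, Or.inr hcc, hm⟩
    · rintro (h | ⟨cc, (rfl | hcc), hm⟩)
      · exact Or.inl (Or.inl h)
      · exact Or.inl (Or.inr hm)
      · exact Or.inr ⟨cc, hcc, hm⟩

theorem partners_nodup (cs : List (List Char)) (getp : List Char → List Int) (s0 : PySem.Set Int)
    (h : s0.Nodup) : (cs.foldl (fun s c => PySem.Set.update s (getp c)) s0).Nodup := by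
  induction cs generalizing s0 with
  | nil => exact h
  | cons c t ih => exact ih _ (PySem.Set.nodup_update _ _ h)

-- ===== VERDICT (by name: the statement is the Claim_ definition above) =====
theorem graph_b_spec : Claim_equal_graph_b := by
  intro xs _
  show graph_b xs = graph_b_alt xs
  unfold graph_b graph_b_alt
  dsimp only
  apply congrArg
  apply PySem.List.foldl_congr_mem
  intro nb i hi
  rw [PySem.List.mem_pyRange_one] at hi
  simp only [PySem.List.len_eq] at hi
  obtain ⟨hi0, hiL⟩ := hi
  rw [PySem.List.foldl_if_eq_foldl_filter
        (p := fun j => proverka_b (PySem.List.pyGetD xs i 0) (PySem.List.pyGetD xs j 0))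
        (f := fun nb j => pvEdge nb (PySem.List.pyGetD xs i 0) (PySem.List.pyGetD xs j 0)),
      PySem.List.foldl_ite_eq_foldl_filter (p := fun j => j > i)
        (f := fun nb j => pvEdge nb (PySem.List.pyGetD xs i 0) (PySem.List.pyGetD xs j 0))]
  simp only [PySem.List.len_eq]
  try dsimp only
  congr 1
  set pf := fun j => proverka_b (PySem.List.pyGetD xs i 0) (PySem.List.pyGetD xs j 0) with hpf
  set strs := xs.map (fun v => PySem.Int.toChars v) with hstrs
  set dels := strs.map pvDels with hdels
  have hgeti : PySem.List.pyGetD xs i 0 = xs[i.toNat] := PySem.List.pyGetD_eq_getElem xs 0 hi0 hiL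
  have hstri : PySem.List.pyGetD strs i [] = PySem.Int.toChars xs[i.toNat] := by
    rw [PySem.List.pyGetD_eq_getElem strs [] hi0 (by simpa [hstrs] using hiL)]
    simp [hstrs]
  have hdeli : PySem.List.pyGetD dels i [] = pvDels (PySem.Int.toChars xs[i.toNat]) := by
    rw [PySem.List.pyGetD_eq_getElem dels [] hi0 (by simpa [hdels, hstrs] using hiL)]
    simp [hdels, hstrs]
  rw [hdeli, hstri]
  set P := PySem.Set.update
      ((pvDels (PySem.Int.toChars xs[i.toNat])).foldl
        (fun s c => PySem.Set.update s
          (((PySem.List.enumerate strs).foldl (fun d p => d.modify p.2 [] (· ++ [p.1]))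
            (PySem.Dict.empty : PySem.Dict (List Char) (List Int))).getD c []))
        (PySem.Set.empty : PySem.Set Int))
      (((PySem.List.enumerate dels).foldl
          (fun d p => p.2.foldl (fun d cc => d.modify cc [] (· ++ [p.1])) d)
          (PySem.Dict.empty : PySem.Dict (List Char) (List Int))).getD
        (PySem.Int.toChars xs[i.toNat]) []) with hP
  have hsorted : PySem.List.sorted P (fun x => x)
      = (PySem.List.pyRange 0 (xs.length : Int) 1).filter pf := by
    refine PySem.List.sorted_eq_of_perm_of_pairwise_lt _ _ _
      ((List.perm_ext_iff_of_nodup ?_ ?_).mpr ?_) ?_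
    · exact ((PySem.List.pairwise_lt_pyRange_one 0 (xs.length : Int)).filter _).imp ne_of_lt
    · rw [hP]
      exact PySem.Set.nodup_update _ _ (partners_nodup _ _ _ (by simp [PySem.Set.empty]))
    · intro j
      rw [hP, PySem.Set.mem_update, partners_mem, List.mem_filter, PySem.List.mem_pyRange_one]
      constructor
      · rintro ⟨⟨hj0, hjL⟩, hpj⟩
        have hgetj : PySem.List.pyGetD xs j 0 = xs[j.toNat] :=
          PySem.List.pyGetD_eq_getElem xs 0 hj0 hjL
        simp only [hpf] at hpj
        rw [hgeti, hgetj, proverka_iff] at hpj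
        rcases hpj with hp | hp
        · exact Or.inl (Or.inr ⟨PySem.Int.toChars xs[j.toNat], hp,
            (pos_mem strs _ j).mpr ⟨j.toNat, by simp [hstrs]; omega, by simp [hstrs], by omega⟩⟩)
        · exact Or.inr ((dmap_mem dels _ j).mpr
            ⟨j.toNat, by simp [hdels, hstrs]; omega, by simpa [hdels, hstrs] using hp, by omega⟩)
      · rintro ((h | ⟨c, hc, hposc⟩) | hdm)
        · exact absurd h (by simp [PySem.Set.empty])
        · obtain ⟨k, hk, hck, rfl⟩ := (pos_mem strs c _).mp hposc
          have hkL : ((k : Int)) < (xs.length : Int) := by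
            simp [hstrs] at hk; omega
          refine ⟨⟨by omega, hkL⟩, ?_⟩
          have hgetk : PySem.List.pyGetD xs (k : Int) 0 = xs[k] := by
            rw [PySem.List.pyGetD_eq_getElem xs 0 (by omega) hkL]
            simp
          simp only [hpf]
          rw [hgeti, hgetk, proverka_iff]
          left
          have hsk : strs[k] = PySem.Int.toChars xs[k] := by simp [hstrs]
          rw [hsk] at hck
          rw [hck]
          exact hc
        · obtain ⟨k, hk, hck, rfl⟩ := (dmap_mem dels _ _).mp hdm
          have hkL : ((k : Int)) < (xs.length : Int) := by
            simp [hdels, hstrs] at hk; omega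
          refine ⟨⟨by omega, hkL⟩, ?_⟩
          have hgetk : PySem.List.pyGetD xs (k : Int) 0 = xs[k] := by
            rw [PySem.List.pyGetD_eq_getElem xs 0 (by omega) hkL]
            simp
          simp only [hpf]
          rw [hgeti, hgetk, proverka_iff]
          right
          simpa [hdels, hstrs] using hck
    · exact (PySem.List.pairwise_lt_pyRange_one 0 (xs.length : Int)).filter _
  have hfinal : List.filter (fun x => decide (x > i))
        (List.filter pf (PySem.List.pyRange 0 (xs.length : Int) 1))
      = List.filter pf (PySem.List.pyRange (i + 1) (xs.length : Int) 1) := by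
    rw [PySem.List.pyRange_one_append 0 (i + 1) (xs.length : Int) (by omega) (by omega),
        List.filter_append, List.filter_append]
    have h1 : List.filter (fun x => decide (x > i))
        (List.filter pf (PySem.List.pyRange 0 (i + 1) 1)) = [] :=
      List.filter_eq_nil_iff.mpr (fun j hj => by
        have hj' := (List.mem_filter.mp hj).1
        rw [PySem.List.mem_pyRange_one] at hj'
        simp only [gt_iff_lt, decide_eq_true_eq]
        omega)
    have h2 : List.filter (fun x => decide (x > i))
        (List.filter pf (PySem.List.pyRange (i + 1) (xs.length : Int) 1))
        = List.filter pf (PySem.List.pyRange (i + 1) (xs.length : Int) 1) :=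
      List.filter_eq_self.mpr (fun j hj => by
        have hj' := (List.mem_filter.mp hj).1
        rw [PySem.List.mem_pyRange_one] at hj'
        simp only [gt_iff_lt, decide_eq_true_eq]
        omega)
    rw [h1, h2, List.nil_append]
  rw [hsorted, hfinal]
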